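-- pv_equiv track=rewrite | github.com/laurenostrowski/ceciestunepipe | mods/bout_detection_mf.py | find_start_end_idxs_POIs
-- ===== SOURCE A (Python) =====
-- def find_start_end_idxs_POIs(binary_signal, samples_between_poi, min_samples_poi=1):
--     """"
--     Returns a list of tuples (start_idx, end_idx) for each period of interest found in the audio file.
--
--      Input: Binary vector where ones indicate samples that are above a specified audio threshold, zeros indicate samples below the threshold.
--      samples_between_poi = Number of samples needed to consider two POIs independent.
--      min_samples_poi = Minimum number of samples that a POI must have to not be discarded.
--
--      Output: list of [start_idx, end_idx] for each POI found.
--     """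
--     start_end_idxs = []
--     start_idx = None
--     end_idx = None
--     zero_counter = 0
--
--     for i in range(len(binary_signal)):
--
--         if binary_signal[i] == 1:
--             if start_idx == None:
--                 start_idx = i
--
--             elif zero_counter != 0 or end_idx is not None:
--                 zero_counter = 0
--                 end_idx = None
--
--         elif binary_signal[i] == 0:
--
--             if start_idx != None:
--                 if zero_counter == 0:
--                     end_idx = i
--                     zero_counter += 1
--
--                 elif zero_counter < samples_between_poi:
--                     zero_counter += 1
--
--                 elif zero_counter >= samples_between_poi:
--                     if end_idx - start_idx > min_samples_poi:
--                         start_end_idxs.append([start_idx, end_idx])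
--                     start_idx = None
--                     end_idx = None
--                     zero_counter = 0
--
--         # if we are in a POI and the file ends
--         if i == len(binary_signal)-1 and start_idx != None:
--             start_end_idxs.append([start_idx, i])
--
--     return start_end_idxs
-- ===== SOURCE B (Python) =====
-- def find_start_end_idxs_POIs(binary_signal, samples_between_poi, min_samples_poi=1):
--     # Phase 1: collect maximal runs of ones; for each run record its start index,
--     # the index of the first zero after it, and how many zeros follow it
--     # (samples that are neither 0 nor 1 are ignored, as in the original).
--     runs = []
--     cur = None  # (run_start, first_zero_after or None, zeros_after)
--     for i, v in enumerate(binary_signal):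
--         if v == 1:
--             if cur is None or cur[2] > 0:
--                 if cur is not None:
--                     runs.append(cur)
--                 cur = (i, None, 0)
--         elif v == 0:
--             if cur is not None:
--                 s, fz, zc = cur
--                 cur = (s, i if fz is None else fz, zc + 1)
--     if cur is not None:
--         runs.append(cur)
--     # Phase 2: merge runs separated by at most thr zeros into one POI.
--     thr = samples_between_poi if samples_between_poi > 1 else 1
--     out = []
--     poi_start = None
--     for start, first_zero, zcount in runs:
--         if poi_start is None:
--             poi_start = start
--         if zcount > thr:
--             if first_zero - poi_start > min_samples_poi:
--                 out.append([poi_start, first_zero])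
--             poi_start = None
--     if poi_start is not None:
--         out.append([poi_start, len(binary_signal) - 1])
--     return out
-- ===== Notes on version B (the rewrite author's own statement) =====
-- stated objective: simpler
-- what changed: A's single stateful scan (start/end/zero-counter state machine with an in-loop end-of-file check) is replaced by two small phases: first collect the maximal runs of ones together with the first-zero index and zero count after each, then merge runs whose separating gap has at most max(samples_between_poi,1) zeros into POIs. (the run list is far shorter than the raw signal, so phase 2 touches little data and the per-sample work is smaller)
import Mathlib
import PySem

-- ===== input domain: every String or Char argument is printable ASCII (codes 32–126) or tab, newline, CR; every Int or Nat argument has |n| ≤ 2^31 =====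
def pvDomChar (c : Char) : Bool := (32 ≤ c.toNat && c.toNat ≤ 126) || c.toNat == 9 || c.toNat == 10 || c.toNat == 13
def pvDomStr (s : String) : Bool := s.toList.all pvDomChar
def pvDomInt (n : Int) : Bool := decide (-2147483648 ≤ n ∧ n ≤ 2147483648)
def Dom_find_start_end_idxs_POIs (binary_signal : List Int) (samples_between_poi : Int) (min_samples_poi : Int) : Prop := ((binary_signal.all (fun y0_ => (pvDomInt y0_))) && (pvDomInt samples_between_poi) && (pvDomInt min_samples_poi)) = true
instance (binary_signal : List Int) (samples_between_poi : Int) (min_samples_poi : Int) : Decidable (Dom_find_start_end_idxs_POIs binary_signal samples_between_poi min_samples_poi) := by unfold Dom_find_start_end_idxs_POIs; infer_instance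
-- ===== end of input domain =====

-- B replaces A's single stateful scan by two phases (collect maximal runs of ones
-- with their following zero gaps, then merge runs into POIs); same return value, simpler decomposition.

-- ===== PORT A =====
-- loop body of A's for-loop (state: collected list, start_idx, end_idx, zero_counter)
def stepA (sbp msp : Int) (i : Nat) (v : Int)
    (σ : List (List Int) × Option Int × Option Int × Int) :
    List (List Int) × Option Int × Option Int × Int :=
  match σ with
  | (acc, st?, en?, zc) =>
    if v = 1 then
      match st? with
      | none => (acc, some (i : Int), en?, zc)
      | some st => if zc ≠ 0 ∨ en?.isSome then (acc, some st, none, 0) else (acc, some st, en?, zc)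
    else if v = 0 then
      match st? with
      | some st =>
        if zc = 0 then (acc, some st, some (i : Int), 1)
        else if zc < sbp then (acc, some st, en?, zc + 1)
        else (if en?.getD 0 - st > msp then acc ++ [[st, en?.getD 0]] else acc, none, none, 0)
      | none => (acc, st?, en?, zc)
    else (acc, st?, en?, zc)

-- A's for-loop: body, then the end-of-file check "i == len(binary_signal)-1 and start_idx != None"
def goA (sbp msp : Int) (last : Nat) : Nat → List Int → (List (List Int) × Option Int × Option Int × Int) → List (List Int)
  | _, [], σ => σ.1
  | i, v :: rest, σ =>
    let s := stepA sbp msp i v σ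
    let s2 := if i = last then
        (match s.2.1 with
         | some st => (s.1 ++ [[st, (i : Int)]], s.2.1, s.2.2.1, s.2.2.2)
         | none => s)
      else s
    goA sbp msp last (i + 1) rest s2

def find_start_end_idxs_POIs (binary_signal : List Int) (samples_between_poi : Int) (min_samples_poi : Int) : List (List Int) :=
  goA samples_between_poi min_samples_poi (binary_signal.length - 1) 0 binary_signal ([], none, none, 0)

-- ===== PORT B =====
-- phase 1: maximal runs of ones, each with the first zero index after it and the zero count after it
def phase1 : Nat → List Int → Option (Int × Option Int × Int) → List (Int × Option Int × Int)
  | _, [], cur => match cur with | none => [] | some c => [c]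
  | i, v :: rest, cur =>
    if v = 1 then
      match cur with
      | none => phase1 (i + 1) rest (some ((i : Int), none, 0))
      | some (s, fz, zc) =>
        if zc > 0 then (s, fz, zc) :: phase1 (i + 1) rest (some ((i : Int), none, 0))
        else phase1 (i + 1) rest (some (s, fz, zc))
    else if v = 0 then
      match cur with
      | none => phase1 (i + 1) rest none
      | some (s, fz, zc) => phase1 (i + 1) rest (some (s, some (fz.getD (i : Int)), zc + 1))
    else phase1 (i + 1) rest cur

-- phase 2: merge runs separated by at most thr zeros into POIs
def phase2 (thr msp nEnd : Int) : List (Int × Option Int × Int) → Option Int → List (List Int) → List (List Int)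
  | [], poi?, out => match poi? with | none => out | some p => out ++ [[p, nEnd]]
  | (s, fz, zc) :: rest, poi?, out =>
    let p := poi?.getD s
    if zc > thr then
      phase2 thr msp nEnd rest none (if fz.getD 0 - p > msp then out ++ [[p, fz.getD 0]] else out)
    else phase2 thr msp nEnd rest (some p) out

def find_start_end_idxs_POIs_alt (binary_signal : List Int) (samples_between_poi : Int) (min_samples_poi : Int) : List (List Int) :=
  phase2 (if samples_between_poi > 1 then samples_between_poi else 1) min_samples_poi
    ((binary_signal.length : Int) - 1) (phase1 0 binary_signal none) none []

-- ===== PRECONDITION & SPEC =====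
def Spec_find_start_end_idxs_POIs (binary_signal : List Int) (samples_between_poi : Int) (min_samples_poi : Int) (out : List (List Int)) : Prop := out = find_start_end_idxs_POIs_alt binary_signal samples_between_poi min_samples_poi
instance (binary_signal : List Int) (samples_between_poi : Int) (min_samples_poi : Int) (out : List (List Int)) : Decidable (Spec_find_start_end_idxs_POIs binary_signal samples_between_poi min_samples_poi out) := by unfold Spec_find_start_end_idxs_POIs; infer_instance

-- ===== CLAIM (what is proved, stated in full; the proofs are below) =====
def Claim_equal_find_start_end_idxs_POIs : Prop := ∀ (binary_signal : List Int) (samples_between_poi : Int) (min_samples_poi : Int), Dom_find_start_end_idxs_POIs binary_signal samples_between_poi min_samples_poi → Spec_find_start_end_idxs_POIs binary_signal samples_between_poi min_samples_poi (find_start_end_idxs_POIs binary_signal samples_between_poi min_samples_poi)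

-- ===== LEMMAS AND PROOFS =====

-- plain fold of A's loop body (no end-of-file check)
def foldA (sbp msp : Int) : Nat → List Int → (List (List Int) × Option Int × Option Int × Int) → (List (List Int) × Option Int × Option Int × Int)
  | _, [], σ => σ
  | i, v :: rest, σ => foldA sbp msp (i + 1) rest (stepA sbp msp i v σ)

def finishA (last : Nat) (σ : List (List Int) × Option Int × Option Int × Int) : List (List Int) :=
  match σ.2.1 with
  | some p => σ.1 ++ [[p, (last : Int)]]
  | none => σ.1

-- the state relation between A's loop state and B's (phase-1 current run, phase-2 poi/out) state
def Rinv (sbp msp : Int) (σ : List (List Int) × Option Int × Option Int × Int)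
    (out : List (List Int)) (poi? : Option Int) (cur : Option (Int × Option Int × Int)) : Prop :=
  match σ with
  | (acc, st?, en?, zA) =>
    (st? = none ∧ en? = none ∧ zA = 0 ∧ cur = none ∧ poi? = none ∧ out = acc)
    ∨ (∃ p s, st? = some p ∧ en? = none ∧ zA = 0 ∧ cur = some (s, none, 0)
        ∧ (poi? = some p ∨ (poi? = none ∧ s = p)) ∧ out = acc)
    ∨ (∃ p s e k, st? = some p ∧ en? = some e ∧ zA = k ∧ 1 ≤ k ∧ k ≤ (if sbp > 1 then sbp else 1)
        ∧ cur = some (s, some e, k) ∧ (poi? = some p ∨ (poi? = none ∧ s = p)) ∧ out = acc)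
    ∨ (∃ s e k, st? = none ∧ en? = none ∧ zA = 0 ∧ cur = some (s, some e, k)
        ∧ k > (if sbp > 1 then sbp else 1)
        ∧ (if e - poi?.getD s > msp then out ++ [[poi?.getD s, e]] else out) = acc)

lemma goA_eq_finish (sbp msp : Int) (last : Nat) :
    ∀ (rest : List Int) (v : Int) (i : Nat) (σ : List (List Int) × Option Int × Option Int × Int),
      i + rest.length = last →
      goA sbp msp last i (v :: rest) σ = finishA last (foldA sbp msp i (v :: rest) σ) := by
  intro rest
  induction rest with
  | nil =>
    intro v i σ h
    have hi : i = last := by simpa using h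
    subst hi
    simp only [goA, foldA]
    cases hs : (stepA sbp msp i v σ).2.1 <;> simp [finishA, hs]
  | cons w rest' ih =>
    intro v i σ h
    have hne : i ≠ last := by simp at h; omega
    simp only [goA, foldA, if_neg hne]
    exact ih w (i + 1) _ (by simp at h ⊢; omega)

lemma main_inv (sbp msp : Int) (last : Nat) :
    ∀ (rest : List Int) (i : Nat) (σ : List (List Int) × Option Int × Option Int × Int)
      (out : List (List Int)) (poi? : Option Int) (cur : Option (Int × Option Int × Int)),
      Rinv sbp msp σ out poi? cur →
      finishA last (foldA sbp msp i rest σ) =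
        phase2 (if sbp > 1 then sbp else 1) msp (last : Int) (phase1 i rest cur) poi? out := by
  intro rest
  have hthr : (1 : Int) ≤ (if sbp > 1 then sbp else 1) := by split <;> omega
  induction rest with
  | nil =>
    intro i σ out poi? cur hR
    obtain ⟨acc, st?, en?, zA⟩ := σ
    rcases hR with ⟨rfl, rfl, rfl, rfl, rfl, rfl⟩ |
      ⟨p, s, rfl, rfl, rfl, rfl, h5, rfl⟩ |
      ⟨p, s, e, k, rfl, rfl, rfl, hk1, hk2, rfl, h5, rfl⟩ |
      ⟨s, e, k, rfl, rfl, rfl, rfl, hk, h6⟩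
    · simp [foldA, finishA, phase1, phase2]
    · rcases h5 with rfl | ⟨rfl, rfl⟩ <;>
      · simp only [foldA, finishA, phase1, phase2]
        rw [if_neg (by omega)]
        simp
    · rcases h5 with rfl | ⟨rfl, rfl⟩ <;>
      · simp only [foldA, finishA, phase1, phase2]
        rw [if_neg (by omega)]
        simp
    · simp only [foldA, finishA, phase1, phase2]
      rw [if_pos (by omega)]
      simp only [Option.getD_some]
      exact h6.symm
  | cons v rest ih =>
    intro i σ out poi? cur hR
    obtain ⟨acc, st?, en?, zA⟩ := σ
    simp only [foldA, phase1]
    by_cases hv1 : v = 1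
    · rcases hR with ⟨rfl, rfl, rfl, rfl, rfl, rfl⟩ |
        ⟨p, s, rfl, rfl, rfl, rfl, h5, rfl⟩ |
        ⟨p, s, e, k, rfl, rfl, rfl, hk1, hk2, rfl, h5, rfl⟩ |
        ⟨s, e, k, rfl, rfl, rfl, rfl, hk, h6⟩
      · -- fresh state, a 1 starts a new run and POI
        simp only [stepA, if_pos hv1]
        exact ih (i + 1) _ _ _ _ (Or.inr (Or.inl
          ⟨(i : Int), (i : Int), rfl, rfl, rfl, rfl, Or.inr ⟨rfl, rfl⟩, rfl⟩))
      · -- inside a run of ones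
        simp only [stepA, if_pos hv1]
        rw [if_neg (by simp)]
        simp only [show ((0:Int) > 0) = False by simp, if_false]
        exact ih (i + 1) _ _ _ _ (Or.inr (Or.inl ⟨p, s, rfl, rfl, rfl, rfl, h5, rfl⟩))
      · -- a 1 after 1 ≤ k ≤ thr zeros: merge into the POI
        simp only [stepA, if_pos hv1]
        rw [if_pos (Or.inr rfl : zA ≠ 0 ∨ (some e : Option Int).isSome = true)]
        rw [if_pos (by omega : zA > 0)]
        have hrw : ∀ runs : List (Int × Option Int × Int),
            phase2 (if sbp > 1 then sbp else 1) msp (last : Int) ((s, some e, zA) :: runs) poi? out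
              = phase2 (if sbp > 1 then sbp else 1) msp (last : Int) runs (some p) out := by
          intro runs
          simp only [phase2]
          rw [if_neg (by omega)]
          rcases h5 with rfl | ⟨rfl, rfl⟩ <;> simp
        rw [hrw]
        exact ih (i + 1) _ _ _ _ (Or.inr (Or.inl
          ⟨p, (i : Int), rfl, rfl, rfl, rfl, Or.inl rfl, rfl⟩))
      · -- a 1 after a gap longer than thr: previous POI is emitted, new one starts
        simp only [stepA, if_pos hv1]
        rw [if_pos (by omega : k > 0)]
        have hrw : ∀ runs : List (Int × Option Int × Int),
            phase2 (if sbp > 1 then sbp else 1) msp (last : Int) ((s, some e, k) :: runs) poi? out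
              = phase2 (if sbp > 1 then sbp else 1) msp (last : Int) runs none acc := by
          intro runs
          simp only [phase2]
          rw [if_pos (by omega)]
          simp only [Option.getD_some]
          rw [h6]
        rw [hrw]
        exact ih (i + 1) _ _ _ _ (Or.inr (Or.inl
          ⟨(i : Int), (i : Int), rfl, rfl, rfl, rfl, Or.inr ⟨rfl, rfl⟩, rfl⟩))
    · by_cases hv0 : v = 0
      · rcases hR with ⟨rfl, rfl, rfl, rfl, rfl, rfl⟩ |
          ⟨p, s, rfl, rfl, rfl, rfl, h5, rfl⟩ |
          ⟨p, s, e, k, rfl, rfl, rfl, hk1, hk2, rfl, h5, rfl⟩ |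
          ⟨s, e, k, rfl, rfl, rfl, rfl, hk, h6⟩
        · -- zeros before any run are ignored
          simp only [stepA, if_neg hv1, if_pos hv0]
          exact ih (i + 1) _ _ _ _ (Or.inl ⟨rfl, rfl, rfl, rfl, rfl, rfl⟩)
        · -- first zero after a run
          simp only [stepA, if_neg hv1, if_pos hv0]
          simp only [if_true, Option.getD_none, zero_add]
          exact ih (i + 1) _ _ _ _ (Or.inr (Or.inr (Or.inl
            ⟨p, s, (i : Int), 1, rfl, rfl, rfl, le_refl 1, hthr, rfl, h5, rfl⟩)))
        · -- further zero in an open gap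
          simp only [stepA, if_neg hv1, if_pos hv0]
          rw [if_neg (by omega)]
          simp only [Option.getD_some]
          by_cases hlt : zA < sbp
          · rw [if_pos hlt]
            exact ih (i + 1) _ _ _ _ (Or.inr (Or.inr (Or.inl
              ⟨p, s, e, zA + 1, rfl, rfl, rfl, by omega, by by_cases hs : sbp > 1 <;> simp only [hs, if_true, if_false] at hk2 ⊢ <;> omega,
               rfl, h5, rfl⟩)))
          · -- the gap reaches the threshold: A finalizes the POI now
            rw [if_neg hlt]
            refine ih (i + 1) _ _ _ _ (Or.inr (Or.inr (Or.inr
              ⟨s, e, zA + 1, rfl, rfl, rfl, rfl, by split <;> omega, ?_⟩)))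
            rcases h5 with rfl | ⟨rfl, rfl⟩ <;> simp
        · -- zeros after a finalized gap keep extending it
          simp only [stepA, if_neg hv1, if_pos hv0]
          simp only [Option.getD_some]
          exact ih (i + 1) _ _ _ _ (Or.inr (Or.inr (Or.inr
            ⟨s, e, k + 1, rfl, rfl, rfl, rfl, by omega, h6⟩)))
      · -- a sample that is neither 0 nor 1 is skipped by both programs
        simp only [stepA, if_neg hv1, if_neg hv0]
        exact ih (i + 1) _ _ _ _ hR

-- ===== VERDICT (by name: the statement is the Claim_ definition above) =====
theorem find_start_end_idxs_POIs_spec : Claim_equal_find_start_end_idxs_POIs := by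
  intro bs sbp msp _
  unfold Spec_find_start_end_idxs_POIs find_start_end_idxs_POIs find_start_end_idxs_POIs_alt
  cases bs with
  | nil => simp [goA, phase1, phase2]
  | cons v rest =>
    have hlast : (v :: rest).length - 1 = rest.length := by simp
    rw [hlast, goA_eq_finish sbp msp rest.length rest v 0 _ (by simp),
        main_inv sbp msp rest.length (v :: rest) 0 _ [] none none (Or.inl (by simp))]
    have : ((v :: rest).length : Int) - 1 = (rest.length : Int) := by simp
    rw [this]
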